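/- PORTED by tools/port_fixed.py from Prog/Jsmn/D/StrInv.lean to THE FIXED IMAGE fixed/jsmn_d.bin (same bytes at the same addresses; binFD). Do not edit: edit the original and port again. -/
/-
  jsmn_d.bin: `jsmn_parse_string` (326 bytes at 100134H, 106 instructions, two loops, two calls) — THE CUT POINTS AND THE STATE PREDICATES AT THEM.

  REGISTERS after the prologue (100134H – 100149H: push rbp, push rbx): rbx = parser, rdi = js, rsi = len, r9 = tokens, r8 = num_tokens,
  ebp = start (= parser->pos on entry, zero-extended); rsp = sp0 - 10H where sp0 = rsp on entry; the saved rbp at sp0-8, the saved rbx at sp0-10H.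
  `parser->pos` lives in memory ([rbx]) and is stored on every change.

  CUT POINTS
    1001F9H  OUTER LOOP HEAD  the string body; the model's `strScan` from the position in [rbx]
    1001F2H  `parser->pos++`  every `break` / fall-through of the body lands here
    100220H  a backslash with `pos + 1 < len`: ecx = eax = pos + 1, about to be stored
    1001A8H  INNER LOOP HEAD  the up-to-4 hex digits after `\u`; ecx = i; the model's `hexScan` with 4 - i digits to go
    10014EH  the closing quote
    10019DH  `return r`: r in eax; pop rbx, pop rbp, ret (every `return` lands here)
-/
import Prog.Jsmn.Fixed.Specs
import Prog.Jsmn.State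
import Prog.Jsmn.Fixed.CodeFD
import X86.Derived.Prog.MemWords
import X86.Derived.Prog.Reach

namespace X86
namespace J6
namespace FD
namespace Str
open X86.User (CodeAt RegsKept Span FlagsOK Layout toNat_add_ofNat toNat_ofNat_lt' add_ofNat_add)
open Jsmn JsmnFDBytes

set_option linter.unusedVariables false

/-- The constants of one call of jsmn_parse_string. -/
structure SCtx where
  ret : Word
  pa : Word
  jsA : Word
  tb : Word
  js : List UInt8
  numTokens : Nat
  /-- the parser state and the tokens argument on entry -/
  p : Parser
  toks : Option Tokens

/-- The number of bytes of the token array. -/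
def SCtx.tlen (c : SCtx) : Nat := toksBytes Config.default c.numTokens c.toks

/-- What jsmn_parse_string was called with (the hypotheses of `StrSpec`, bundled). -/
structure Entry (c : SCtx) (n : User.Layout) (v0 : User.State) : Prop where
  pre : ScanPre binFD n binFD.str binFD.useStr v0 c.ret c.pa c.jsA c.tb c.js c.numTokens c.p c.toks
  r8 : v0.reg .r8 = UInt64.ofNat c.numTokens

/-- What holds from the prologue to the epilogue: the stack frame (two saved registers, the return address), what memory may have changed, and
the parser / tokens in memory = `pp` / `tk`. -/
structure Core (c : SCtx) (n : User.Layout) (v0 v : User.State) (pp : Parser) (tk : Option Tokens) : Prop where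
  rsp : v.reg .rsp = v0.reg .rsp - 0x10
  kept : RegsKept [.rax, .rcx, .rdx, .rbx, .rsp, .rbp, .rsi, .rdi, .r8, .r9, .r10, .r11, .r16, .r17, .r18, .r19, .r20, .r21, .r22, .r23, .r24, .r25,
    .r26, .r27, .r28, .r29, .r30, .r31] v0 v
  svbp : v.mem.readLE (v0.reg .rsp - 0x8) 8 = (v0.reg .rbp).toNat
  svbx : v.mem.readLE (v0.reg .rsp - 0x10) 8 = (v0.reg .rbx).toNat
  retA : UInt64.ofNat (v.mem.readLE (v0.reg .rsp) 8) = c.ret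
  same : SameOutside v0.mem v.mem (((v0.reg .rsp).toNat - 24, (v0.reg .rsp).toNat) :: dataWins c.pa c.tb c.tlen)
  code : CodeAt v.mem 0x100134 jsmn_parse_string_bytes
  parser : ParserAt v.mem c.pa pp
  toksArg : ToksArg Config.default v.mem c.tb c.numTokens tk

/-- Inside the scanning loops: `Core` with `parser->pos = q` (nothing else has changed yet) + the registers that hold the arguments + the text. -/
structure Frame (c : SCtx) (n : User.Layout) (v0 v : User.State) (q : Nat) : Prop where
  core : Core c n v0 v { c.p with pos := q } c.toks
  rbx : v.reg .rbx = c.pa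
  rdi : v.reg .rdi = c.jsA
  rsi : v.reg .rsi = UInt64.ofNat c.js.length
  r9 : v.reg .r9 = c.tb
  r8 : v.reg .r8 = UInt64.ofNat c.numTokens
  rbp : v.reg .rbp = UInt64.ofNat c.p.pos
  text : CodeAt v.mem c.jsA c.js

/-- At a cut point `addr` inside the loops, with `parser->pos = q`. -/
def At (c : SCtx) (n : User.Layout) (v0 v : User.State) (addr : Word) (q : Nat) : Prop := v.rip = addr ∧ Frame c n v0 v q

/-- About to return `r` (10019DH), the parser and the tokens in memory being `pp` and `tk`. -/
def AtRet (c : SCtx) (n : User.Layout) (v0 v : User.State) (r : Int) (pp : Parser) (tk : Option Tokens) : Prop :=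
  v.rip = 0x10019d ∧ Core c n v0 v pp tk ∧ v.reg .rax = UInt64.ofNat (u32 r)

/-! ### Characters of the text, as the machine reads them -/

/-- `js[i]` as a one-byte load. -/
theorem char_read {μ : User.Mem} {jsA : Word} {js : List UInt8} (h : CodeAt μ jsA js) (i : Nat) (hi : i < js.length) :
    μ.readLE (jsA + UInt64.ofNat i) 1 = (charAt js i).toNat := by
  rw [User.Mem.readLE_one', h i hi]
  simp [charAt, hi]

theorem more_true {js : List UInt8} {q : Nat} (h1 : q < js.length) (h2 : (charAt js q).toNat ≠ 0) : more js q = true := by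
  have : charAt js q ≠ 0 := fun h => h2 (by rw [h]; rfl)
  simp [more, h1, this]

theorem more_false_len {js : List UInt8} {q : Nat} (h1 : js.length ≤ q) : more js q = false := by
  simp [more, Nat.not_lt.mpr h1]

theorem more_false_nul {js : List UInt8} {q : Nat} (h2 : (charAt js q).toNat = 0) : more js q = false := by
  have : charAt js q = 0 := UInt8.toNat_inj.mp h2
  simp [more, this]

theorem u32_succ (q : Nat) : u32 ((q : Int) + 1) = (q + 1) % 4294967296 := by unfold u32; omega
theorem u32_pred (q : Nat) : u32 ((q : Int) - 1) = (q + 4294967295) % 4294967296 := by unfold u32; omega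

theorem u32_nomem : UInt64.ofNat (u32 JSMN_ERROR_NOMEM) = 4294967295 := by decide
theorem u32_inval : UInt64.ofNat (u32 JSMN_ERROR_INVAL) = 4294967294 := by decide
theorem u32_part : UInt64.ofNat (u32 JSMN_ERROR_PART) = 4294967293 := by decide
theorem u32_zero : UInt64.ofNat (u32 0) = 0 := by decide

/-- The tokens argument, moved to a memory that agrees on the array. -/
theorem toksArg_frame {cfg : Jsmn.Config} {μ ν : User.Mem} {tb : Word} {numTokens : Nat} {tk : Option Tokens} (h : ToksArg cfg μ tb numTokens tk)
    (he : User.Mem.EqOn tb.toNat (tb.toNat + toksBytes cfg numTokens tk) μ ν) (hlt : tb.toNat + toksBytes cfg numTokens tk < 2 ^ 64) :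
    ToksArg cfg ν tb numTokens tk := by
  cases tk with
  | none => exact h
  | some ts =>
    obtain ⟨h0, hl, ht⟩ := h
    simp only [toksBytes] at he hlt
    exact ⟨h0, hl, ht.frame (by rw [hl]; exact he) (by rw [hl]; exact hlt)⟩

/-- The token array of the default configuration (16-byte tokens), moved to a memory that agrees on it: `TokensAt.frame` with the size as a literal. -/
theorem tokensAt_frame16 {μ ν : User.Mem} {tb : Word} {ts : Tokens} (h : TokensAt Config.default μ tb ts)
    (he : User.Mem.EqOn tb.toNat (tb.toNat + 16 * ts.length) μ ν) (hlt : tb.toNat + 16 * ts.length < 2 ^ 64) : TokensAt Config.default ν tb ts :=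
  h.frame he hlt

end Str
end FD
end J6
end X86

set_option hygiene false in
/-- The end of a region inside the loops: `Frame c n v0 <setter nest over v> q'` from the opened frame `hf` at `v` (`v3_open hf`); what is left is
the goal `<memory>.readLE c.pa 4 = q'`. -/
macro "str_frame_f" : tactic => `(tactic|
  (refine ⟨⟨by (v3_regnorm; exact hf_core_rsp), by v3_kept, by v3_frame hf_core_svbp, by v3_frame hf_core_svbx, by v3_frame hf_core_retA,
      by (unfold dataWins SCtx.tlen at *; v3_same), by v3_frame hf_core_code,
      ⟨?_, by v3_frame hf_core_parser_toknext, by v3_frame hf_core_parser_toksuper⟩, by (unfold SCtx.tlen at *; v3_frame hf_core_toksArg)⟩,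
    by (v3_regnorm; exact hf_rbx), by (v3_regnorm; exact hf_rdi), by (v3_regnorm; exact hf_rsi), by (v3_regnorm; exact hf_r9), by (v3_regnorm; exact hf_r8),
    by (v3_regnorm; exact hf_rbp), by v3_frame hf_text⟩))

set_option hygiene false in
/-- With a token array (`hs : c.toks = some ts0`, the opened `hf_core : Core … (some ts)`): the array's size as `16 * c.numTokens` in the layout facts
and the footprint; `ToksArg` split into `htb0 : c.tb ≠ 0`, `htslen : ts.length = c.numTokens`, `htoks : TokensAt …`. -/
macro "str_some_f" : tactic => `(tactic|
  (simp only [dataWins, SCtx.tlen, hs, toksBytes, ToksArg, tokSize_default] at hf_core_same hf_core_toksArg hp_env_toksR_hi hp_env_toksR_img hp_env_toksR_stk hp_env_parserToks hp_env_jsToks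
   obtain ⟨htb0, htslen, htoks⟩ := hf_core_toksArg))

set_option hygiene false in
/-- An error exit: `AtRet c n v0 <setter nest over v> r c.p c.toks` from the opened frame `hf` at `v`, after `mov [rbx], ebp ; mov eax, r`
(needs `hpos : c.p.pos < 2 ^ 32` in the context). -/
macro "str_fail_f" : tactic => `(tactic|
  (refine ⟨by simp, ⟨by (v3_regnorm; exact hf_core_rsp), by v3_kept, by v3_frame hf_core_svbp, by v3_frame hf_core_svbx, by v3_frame hf_core_retA,
      by (unfold dataWins SCtx.tlen at *; v3_same), by v3_frame hf_core_code,
      ⟨by v3_read, by v3_frame hf_core_parser_toknext, by v3_frame hf_core_parser_toksuper⟩, by (unfold SCtx.tlen at *; v3_frame hf_core_toksArg)⟩,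
    by (v3_regnorm; first | exact u32_inval.symm | exact u32_part.symm | exact u32_nomem.symm)⟩))

macro_rules
  | `(tactic| v3_frame_rule $h) => `(tactic| first
    | (with_reducible refine X86.J6.FD.Str.toksArg_frame $h ?eqon ?side)
    | (with_reducible refine X86.J6.FD.Str.tokensAt_frame16 $h ?eqon ?side))
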